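-- pv_equiv track=rewrite | github.com/jrmerwin/lepton_mass_ratio | rmr_simulations.py | cavity_interior
-- ===== SOURCE A (Python) =====
-- def cavity_interior(size, cr, cc, half_width):
--     """Return list of interior node IDs for a cavity."""
--     nodes = []
--     for dr in range(-half_width, half_width + 1):
--         for dc in range(-half_width, half_width + 1):
--             r, c = cr + dr, cc + dc
--             if 0 <= r < size and 0 <= c < size:
--                 nodes.append(r * size + c)
--     return nodes
-- ===== SOURCE B (Python) =====
-- def cavity_interior(size, cr, cc, half_width):
--     """Return list of interior node IDs for a cavity."""
--     r_lo = max(0, cr - half_width)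
--     r_hi = min(size - 1, cr + half_width)
--     c_lo = max(0, cc - half_width)
--     c_hi = min(size - 1, cc + half_width)
--     nrows = r_hi - r_lo + 1
--     ncols = c_hi - c_lo + 1
--     if nrows <= 0 or ncols <= 0:
--         return []
--     first = r_lo * size + c_lo
--     gap = size - ncols
--     return [first + k + (k // ncols) * gap for k in range(nrows * ncols)]
-- ===== Notes on version B (the rewrite author's own statement) =====
-- stated objective: faster
-- what changed: B clamps the valid rectangle once, then replaces A's nested offset loops with a single flat loop over k in range(nrows*ncols), computing each node ID in closed form as first + k + (k//ncols)*gap - no nested loops and no per-cell bounds checks remain.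
import Mathlib
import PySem

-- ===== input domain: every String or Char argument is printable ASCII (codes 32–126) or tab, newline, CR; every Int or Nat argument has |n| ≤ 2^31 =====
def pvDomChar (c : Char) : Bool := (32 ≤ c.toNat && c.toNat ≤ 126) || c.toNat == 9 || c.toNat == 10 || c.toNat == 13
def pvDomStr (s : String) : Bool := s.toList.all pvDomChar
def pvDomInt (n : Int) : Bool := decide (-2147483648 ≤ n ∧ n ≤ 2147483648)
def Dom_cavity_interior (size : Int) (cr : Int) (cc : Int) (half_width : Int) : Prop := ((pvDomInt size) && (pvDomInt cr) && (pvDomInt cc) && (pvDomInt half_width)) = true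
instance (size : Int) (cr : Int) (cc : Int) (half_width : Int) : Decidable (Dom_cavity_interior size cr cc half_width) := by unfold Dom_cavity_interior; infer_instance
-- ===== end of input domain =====

-- B clamps the valid rectangle once and then runs ONE flat loop over k in range(nrows*ncols),
-- decoding each node ID in closed form (first + k + (k // ncols) * gap); no nested loops, no
-- per-cell bounds checks.

-- ===== PORT A =====
def cavity_interior (size : Int) (cr : Int) (cc : Int) (half_width : Int) : List Int :=
  (PySem.List.pyRange (-half_width) (half_width + 1) 1).foldl (fun nodes dr =>
    (PySem.List.pyRange (-half_width) (half_width + 1) 1).foldl (fun nodes dc =>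
      let r := cr + dr
      let c := cc + dc
      if 0 ≤ r ∧ r < size ∧ 0 ≤ c ∧ c < size then nodes ++ [r * size + c] else nodes) nodes) []

-- ===== PORT B =====
def cavity_interior_alt (size : Int) (cr : Int) (cc : Int) (half_width : Int) : List Int :=
  let r_lo := max 0 (cr - half_width)
  let r_hi := min (size - 1) (cr + half_width)
  let c_lo := max 0 (cc - half_width)
  let c_hi := min (size - 1) (cc + half_width)
  let nrows := r_hi - r_lo + 1
  let ncols := c_hi - c_lo + 1
  if nrows ≤ 0 ∨ ncols ≤ 0 then []
  else
    let first := r_lo * size + c_lo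
    let gap := size - ncols
    (PySem.List.pyRange 0 (nrows * ncols) 1).map
      (fun k => first + k + PySem.Int.floordiv k ncols * gap)

-- ===== PRECONDITION & SPEC =====
def Spec_cavity_interior (size : Int) (cr : Int) (cc : Int) (half_width : Int) (out : List Int) : Prop := out = cavity_interior_alt size cr cc half_width
instance (size : Int) (cr : Int) (cc : Int) (half_width : Int) (out : List Int) : Decidable (Spec_cavity_interior size cr cc half_width out) := by unfold Spec_cavity_interior; infer_instance

-- ===== CLAIM (what is proved, stated in full; the proofs are below) =====
def Claim_equal_cavity_interior : Prop := ∀ (size : Int) (cr : Int) (cc : Int) (half_width : Int), Dom_cavity_interior size cr cc half_width → Spec_cavity_interior size cr cc half_width (cavity_interior size cr cc half_width)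

-- ===== LEMMAS AND PROOFS =====

-- shifting an integer range
theorem pyRange_map_add (off a b : Int) :
    (PySem.List.pyRange a b 1).map (fun x => off + x) = PySem.List.pyRange (off + a) (off + b) 1 := by
  simp [PySem.List.pyRange_one]
  intro k _
  ring

-- filtering an integer range by an interval tightens its bounds
theorem filter_pyRange_interval (a b lo hi : Int) :
    (PySem.List.pyRange a b 1).filter (fun x => decide (lo ≤ x ∧ x < hi))
      = PySem.List.pyRange (max a lo) (min b hi) 1 := by
  by_cases hab : b ≤ a
  · rw [PySem.List.pyRange_one_eq_nil hab, PySem.List.pyRange_one_eq_nil (by omega)]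
    rfl
  · rw [PySem.List.pyRange_one_cons (show a < b by omega)]
    by_cases hmem : lo ≤ a ∧ a < hi
    · rw [List.filter_cons_of_pos (by simpa using hmem), filter_pyRange_interval (a+1) b lo hi,
        show max (a+1) lo = a + 1 from by omega, show max a lo = a from by omega,
        PySem.List.pyRange_one_cons (show a < min b hi by omega)]
    · rw [List.filter_cons_of_neg (by simpa using hmem), filter_pyRange_interval (a+1) b lo hi]
      by_cases hcase : a < lo
      · rw [show max (a+1) lo = max a lo from by omega]
      · rw [PySem.List.pyRange_one_eq_nil (by omega), PySem.List.pyRange_one_eq_nil (by omega)]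
termination_by (b - a).toNat
decreasing_by all_goals omega

-- dropping elements whose image is empty from a flatMap
theorem flatMap_filter_of_empty (l : List Int) (p : Int → Bool) (g : Int → List Int)
    (h : ∀ x ∈ l, p x = false → g x = []) :
    l.flatMap g = (l.filter p).flatMap g := by
  induction l with
  | nil => rfl
  | cons x xs ih =>
    rcases hp : p x with _ | _
    · simp [hp, h x (by simp) hp,
        ih (fun y hy => h y (by simp [hy]))]
    · simp [hp, ih (fun y hy => h y (by simp [hy]))]

-- one row's contribution in A, for an in-bounds row r
theorem row_contrib (size cc half_width r : Int) (hr : 0 ≤ r ∧ r < size) :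
    ((PySem.List.pyRange (-half_width) (half_width + 1) 1).filter
        (fun dc => decide (0 ≤ r ∧ r < size ∧ 0 ≤ cc + dc ∧ cc + dc < size))).map
      (fun dc => r * size + (cc + dc))
    = PySem.List.pyRange (r * size + max 0 (cc - half_width))
        (r * size + min (size - 1) (cc + half_width) + 1) 1 := by
  have h1 : ((PySem.List.pyRange (-half_width) (half_width + 1) 1).filter
        (fun dc => decide (0 ≤ r ∧ r < size ∧ 0 ≤ cc + dc ∧ cc + dc < size)))
      = ((PySem.List.pyRange (-half_width) (half_width + 1) 1).filter
        (fun dc => decide (0 ≤ cc + dc ∧ cc + dc < size))) := by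
    apply List.filter_congr
    intro dc _
    simp [hr.1, hr.2]
  have h2 : ((PySem.List.pyRange (-half_width) (half_width + 1) 1).filter
        (fun dc => decide (0 ≤ cc + dc ∧ cc + dc < size))).map (fun dc => r * size + (cc + dc))
      = (((PySem.List.pyRange (-half_width) (half_width + 1) 1).map (fun dc => cc + dc)).filter
        (fun c => decide (0 ≤ c ∧ c < size))).map (fun c => r * size + c) := by
    rw [List.filter_map, List.map_map]
    rfl
  rw [h1, h2, pyRange_map_add cc, filter_pyRange_interval, pyRange_map_add (r * size),
    show max (cc + -half_width) 0 = max 0 (cc - half_width) from by omega]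
  congr 1
  omega

-- A normalised to a flatMap over the clamped rows, each row one contiguous range
theorem cavity_interior_eq_rows (size cr cc half_width : Int) :
    cavity_interior size cr cc half_width
      = (PySem.List.pyRange (max 0 (cr - half_width)) (min (size - 1) (cr + half_width) + 1) 1).flatMap
          (fun r => PySem.List.pyRange (r * size + max 0 (cc - half_width))
            (r * size + min (size - 1) (cc + half_width) + 1) 1) := by
  unfold cavity_interior
  simp only [PySem.List.foldl_append_ite, PySem.List.foldl_append_eq_flatMap, List.nil_append]
  calc
    (PySem.List.pyRange (-half_width) (half_width + 1) 1).flatMap (fun dr =>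
        ((PySem.List.pyRange (-half_width) (half_width + 1) 1).filter
          (fun dc => decide (0 ≤ cr + dr ∧ cr + dr < size ∧ 0 ≤ cc + dc ∧ cc + dc < size))).map
          (fun dc => (cr + dr) * size + (cc + dc)))
      = ((PySem.List.pyRange (-half_width) (half_width + 1) 1).map (fun dr => cr + dr)).flatMap
          (fun r => ((PySem.List.pyRange (-half_width) (half_width + 1) 1).filter
            (fun dc => decide (0 ≤ r ∧ r < size ∧ 0 ≤ cc + dc ∧ cc + dc < size))).map
            (fun dc => r * size + (cc + dc))) := by rw [List.flatMap_map]
    _ = (PySem.List.pyRange (cr + -half_width) (cr + (half_width + 1)) 1).flatMap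
          (fun r => ((PySem.List.pyRange (-half_width) (half_width + 1) 1).filter
            (fun dc => decide (0 ≤ r ∧ r < size ∧ 0 ≤ cc + dc ∧ cc + dc < size))).map
            (fun dc => r * size + (cc + dc))) := by rw [pyRange_map_add]
    _ = ((PySem.List.pyRange (cr + -half_width) (cr + (half_width + 1)) 1).filter
            (fun r => decide (0 ≤ r ∧ r < size))).flatMap
          (fun r => ((PySem.List.pyRange (-half_width) (half_width + 1) 1).filter
            (fun dc => decide (0 ≤ r ∧ r < size ∧ 0 ≤ cc + dc ∧ cc + dc < size))).map
            (fun dc => r * size + (cc + dc))) := by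
        apply flatMap_filter_of_empty
        intro r _ hp
        simp only [decide_eq_false_iff_not, not_and, not_lt] at hp
        rw [List.map_eq_nil_iff, List.filter_eq_nil_iff]
        intro dc _
        simp only [decide_eq_true_eq, not_and]
        intro h1 h2
        omega
    _ = (PySem.List.pyRange (max 0 (cr - half_width)) (min (size - 1) (cr + half_width) + 1) 1).flatMap
          (fun r => ((PySem.List.pyRange (-half_width) (half_width + 1) 1).filter
            (fun dc => decide (0 ≤ r ∧ r < size ∧ 0 ≤ cc + dc ∧ cc + dc < size))).map
            (fun dc => r * size + (cc + dc))) := by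
        rw [filter_pyRange_interval,
          show max (cr + -half_width) 0 = max 0 (cr - half_width) from by omega,
          show min (cr + (half_width + 1)) size = min (size - 1) (cr + half_width) + 1 from by omega]
    _ = (PySem.List.pyRange (max 0 (cr - half_width)) (min (size - 1) (cr + half_width) + 1) 1).flatMap
          (fun r => PySem.List.pyRange (r * size + max 0 (cc - half_width))
            (r * size + min (size - 1) (cc + half_width) + 1) 1) := by
        apply List.flatMap_congr
        intro r hr
        rw [PySem.List.mem_pyRange_one] at hr
        exact row_contrib size cc half_width r ⟨by omega, by omega⟩

-- the flatMap of equal-length consecutive row ranges IS the single flat range with floordiv decoding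
theorem rows_eq_flat (size c_lo m : Int) (hm : 0 < m) (a b : Int) :
    (PySem.List.pyRange a b 1).flatMap
        (fun r => PySem.List.pyRange (r * size + c_lo) (r * size + c_lo + m) 1)
      = (PySem.List.pyRange 0 ((b - a) * m) 1).map
          (fun k => (a * size + c_lo) + k + PySem.Int.floordiv k m * (size - m)) := by
  by_cases hab : b ≤ a
  · rw [PySem.List.pyRange_one_eq_nil hab,
      PySem.List.pyRange_one_eq_nil (by nlinarith : (b - a) * m ≤ 0)]
    rfl
  · rw [PySem.List.pyRange_one_cons (show a < b by omega), List.flatMap_cons,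
      rows_eq_flat size c_lo m hm (a + 1) b,
      PySem.List.pyRange_one_append 0 m ((b - a) * m) hm.le
        (by nlinarith : m ≤ (b - a) * m),
      List.map_append]
    congr 1
    · -- first row: the first m flat indices, floordiv k m = 0 there
      have h0 : ∀ k ∈ PySem.List.pyRange 0 m 1,
          (a * size + c_lo) + k + PySem.Int.floordiv k m * (size - m)
            = (a * size + c_lo) + k := by
        intro k hk
        rw [PySem.List.mem_pyRange_one] at hk
        rw [show PySem.Int.floordiv k m = 0 from
          (PySem.Int.floordiv_eq_iff_of_pos hm).mpr (by constructor <;> nlinarith)]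
        ring
      rw [List.map_congr_left h0, pyRange_map_add (a * size + c_lo) 0 m]
      congr 1
      ring
    · -- remaining rows: shift the flat index by m
      rw [show PySem.List.pyRange m ((b - a) * m) 1
            = (PySem.List.pyRange 0 ((b - (a + 1)) * m) 1).map (fun x => m + x) from by
          rw [pyRange_map_add m 0 ((b - (a + 1)) * m)]; congr 1 <;> ring,
        List.map_map]
      apply List.map_congr_left
      intro j hj
      rw [PySem.List.mem_pyRange_one] at hj
      simp only [Function.comp]
      have hfd : PySem.Int.floordiv (m + j) m = PySem.Int.floordiv j m + 1 := by
        rw [PySem.Int.floordiv_eq_ediv_of_pos hm, PySem.Int.floordiv_eq_ediv_of_pos hm,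
          show m + j = j + 1 * m by ring, Int.add_mul_ediv_right j 1 hm.ne']
      rw [hfd]
      ring
termination_by (b - a).toNat
decreasing_by omega

theorem cavity_interior_eq_alt (size cr cc half_width : Int) :
    cavity_interior size cr cc half_width = cavity_interior_alt size cr cc half_width := by
  rw [cavity_interior_eq_rows]
  unfold cavity_interior_alt
  set r_lo := max 0 (cr - half_width) with hrlo
  set r_hi := min (size - 1) (cr + half_width) with hrhi
  set c_lo := max 0 (cc - half_width) with hclo
  set c_hi := min (size - 1) (cc + half_width) with hchi
  by_cases hdeg : r_hi + 1 - r_lo ≤ 0 ∨ c_hi - c_lo + 1 ≤ 0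
  · rw [if_pos (by omega)]
    rcases hdeg with h | h
    · rw [PySem.List.pyRange_one_eq_nil (by omega)]
      rfl
    · rw [List.flatMap_eq_nil_iff.mpr]
      intro r _
      exact PySem.List.pyRange_one_eq_nil (by omega)
  · rw [if_neg (by omega)]
    have hm : 0 < c_hi - c_lo + 1 := by omega
    have key := rows_eq_flat size c_lo (c_hi - c_lo + 1) hm r_lo (r_hi + 1)
    simp only [show ∀ r : Int, r * size + c_lo + (c_hi - c_lo + 1) = r * size + c_hi + 1 from
        fun r => by ring] at key
    rw [key]
    congr 2
    ring

-- ===== VERDICT (by name: the statement is the Claim_ definition above) =====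
theorem cavity_interior_spec : Claim_equal_cavity_interior := by
  intro size cr cc half_width _
  unfold Spec_cavity_interior
  exact cavity_interior_eq_alt size cr cc half_width
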